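-- pv_equiv track=rewrite | github.com/davidyisun/NLP_demo | information-extraction/join_extraction_entities_and_relation/demo.py | sentence_label_construction
-- ===== SOURCE A (Python) =====
-- def sentence_label_construction(sentence, relation_label_1, relation_label_2, relation):
--     '''
--     combine the label for each word in each entity with the relation
--     and then combine the relation-entity label with the position of the entity in the triplet
--     '''
--     element_list = sentence.split(" ")
--     dlist_1 = list(relation_label_1)
--     dlist_2 = list(relation_label_2)
--     output_list = []
--     for i in element_list:
--         if i in dlist_1:
--             output_list.append(relation + '-' + relation_label_1[i] + '-1')
--         elif i in dlist_2:
--             output_list.append(relation + '-' + relation_label_2[i] + '-2')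
--         else:
--             output_list.append('O')
--     return output_list
-- ===== SOURCE B (Python) =====
-- def sentence_label_construction(sentence, relation_label_1, relation_label_2, relation):
--     # Build one combined word->label table (dict1 inserted last so it takes
--     # precedence, matching the if/elif order), then label each word by lookup.
--     table = {}
--     for k, v in relation_label_2.items():
--         table[k] = relation + '-' + v + '-2'
--     for k, v in relation_label_1.items():
--         table[k] = relation + '-' + v + '-1'
--     return [table.get(w, 'O') for w in sentence.split(" ")]
-- ===== Notes on version B (the rewrite author's own statement) =====
-- stated objective: idiomatic
-- what changed: Replaces the per-word if/elif membership tests against two key lists by a single combined word-to-label dict built once (dict2 then dict1 so dict1 overwrites, preserving the precedence), after which the word loop is one flat table.get(w, 'O') comprehension.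
import Mathlib
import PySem

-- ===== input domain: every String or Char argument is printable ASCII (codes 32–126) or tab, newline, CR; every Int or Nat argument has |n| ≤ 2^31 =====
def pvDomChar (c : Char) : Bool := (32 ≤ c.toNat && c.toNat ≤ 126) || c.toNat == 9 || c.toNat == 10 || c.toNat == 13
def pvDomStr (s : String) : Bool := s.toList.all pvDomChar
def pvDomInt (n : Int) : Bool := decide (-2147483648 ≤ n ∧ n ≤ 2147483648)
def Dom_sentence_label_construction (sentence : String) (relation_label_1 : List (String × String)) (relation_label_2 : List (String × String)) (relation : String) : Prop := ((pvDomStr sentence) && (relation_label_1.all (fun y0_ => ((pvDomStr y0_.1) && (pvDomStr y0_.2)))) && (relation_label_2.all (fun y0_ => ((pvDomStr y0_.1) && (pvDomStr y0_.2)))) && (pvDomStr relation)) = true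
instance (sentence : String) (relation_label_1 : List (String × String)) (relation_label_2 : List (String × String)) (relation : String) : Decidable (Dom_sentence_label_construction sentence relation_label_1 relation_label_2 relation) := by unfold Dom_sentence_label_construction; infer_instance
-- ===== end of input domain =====

-- B builds one combined word→label dict (dict2 then dict1, so dict1 overwrites) and labels each word by a single lookup, replacing A's per-word if/elif membership scans: more idiomatic, same results.


-- ===== PORT A =====
def sentence_label_construction (sentence : String) (relation_label_1 : List (String × String)) (relation_label_2 : List (String × String)) (relation : String) : List String :=
  let element_list := (PySem.Str.split? sentence " ").getD []
  let dlist_1 := (PySem.Dict.mk relation_label_1).keys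
  let dlist_2 := (PySem.Dict.mk relation_label_2).keys
  element_list.foldl (fun output_list i =>
    if i ∈ dlist_1 then
      output_list ++ [relation ++ "-" ++ (PySem.Dict.mk relation_label_1).getD i "" ++ "-1"]
    else if i ∈ dlist_2 then
      output_list ++ [relation ++ "-" ++ (PySem.Dict.mk relation_label_2).getD i "" ++ "-2"]
    else
      output_list ++ ["O"]) []

-- ===== PORT B =====
def sentence_label_construction_alt (sentence : String) (relation_label_1 : List (String × String)) (relation_label_2 : List (String × String)) (relation : String) : List String :=
  let table0 := relation_label_2.foldl
    (fun t kv => t.insert kv.1 (relation ++ "-" ++ kv.2 ++ "-2")) (PySem.Dict.empty : PySem.Dict String String)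
  let table := relation_label_1.foldl
    (fun t kv => t.insert kv.1 (relation ++ "-" ++ kv.2 ++ "-1")) table0
  ((PySem.Str.split? sentence " ").getD []).map (fun w => table.getD w "O")

-- ===== PRECONDITION & SPEC =====
-- Pre_ states the dict invariant of the type convention: the association lists
-- representing the two Python dicts have no duplicate keys (every Python dict satisfies it).
def Pre_sentence_label_construction (sentence : String) (relation_label_1 : List (String × String)) (relation_label_2 : List (String × String)) (relation : String) : Prop :=
  (relation_label_1.map Prod.fst).Nodup ∧ (relation_label_2.map Prod.fst).Nodup
instance (sentence : String) (relation_label_1 : List (String × String)) (relation_label_2 : List (String × String)) (relation : String) : Decidable (Pre_sentence_label_construction sentence relation_label_1 relation_label_2 relation) := by unfold Pre_sentence_label_construction; infer_instance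
def pvWitness_sentence_label_construction : String × (List (String × String)) × (List (String × String)) × String :=
  ("a b c", [("a", "PER")], [("c", "LOC")], "works")

def Spec_sentence_label_construction (sentence : String) (relation_label_1 : List (String × String)) (relation_label_2 : List (String × String)) (relation : String) (out : List String) : Prop := out = sentence_label_construction_alt sentence relation_label_1 relation_label_2 relation
instance (sentence : String) (relation_label_1 : List (String × String)) (relation_label_2 : List (String × String)) (relation : String) (out : List String) : Decidable (Spec_sentence_label_construction sentence relation_label_1 relation_label_2 relation out) := by unfold Spec_sentence_label_construction; infer_instance

-- ===== CLAIM (what is proved, stated in full; the proofs are below) =====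
def Claim_equal_sentence_label_construction : Prop := ∀ (sentence : String) (relation_label_1 : List (String × String)) (relation_label_2 : List (String × String)) (relation : String), Dom_sentence_label_construction sentence relation_label_1 relation_label_2 relation → Pre_sentence_label_construction sentence relation_label_1 relation_label_2 relation → Spec_sentence_label_construction sentence relation_label_1 relation_label_2 relation (sentence_label_construction sentence relation_label_1 relation_label_2 relation)

-- ===== LEMMAS AND PROOFS =====

-- Lookup in a fold of inserts over an assoc list with distinct keys:
-- it is the (transformed) first-match lookup in the list, falling back to the start dict.
theorem get?_foldl_insert_label (l : List (String × String)) (f : String → String)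
    (t : PySem.Dict String String) (h : (l.map Prod.fst).Nodup) (w : String) :
    (l.foldl (fun t kv => t.insert kv.1 (f kv.2)) t).get? w =
      match (PySem.Dict.mk l).get? w with
      | some v => some (f v)
      | none => t.get? w := by
  induction l generalizing t with
  | nil => simp [PySem.Dict.get?]
  | cons kv rest ih =>
    simp only [List.map_cons, List.nodup_cons] at h
    simp only [List.foldl_cons]
    rw [ih _ h.2]
    rw [PySem.Dict.get?_mk_cons]
    by_cases hw : kv.1 = w
    · subst hw
      have hnone : (PySem.Dict.mk rest).get? kv.1 = none := by
        rw [PySem.Dict.get?_eq_none_iff_not_mem_keys]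
        simpa [PySem.Dict.keys_mk] using h.1
      simp [hnone, PySem.Dict.get?_insert_self]
    · have : (kv.1 == w) = false := by simp [hw]
      simp only [this, Bool.false_eq_true, if_false]
      cases hrest : (PySem.Dict.mk rest).get? w with
      | some v => rfl
      | none =>
        simp only
        exact PySem.Dict.get?_insert_of_ne t (f kv.2) (fun h' => hw h'.symm)

-- The per-word value A computes equals B's table lookup.
theorem word_label_eq (relation_label_1 relation_label_2 : List (String × String)) (relation : String)
    (h1 : (relation_label_1.map Prod.fst).Nodup) (h2 : (relation_label_2.map Prod.fst).Nodup) (w : String) :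
    (let table0 := relation_label_2.foldl
        (fun t kv => t.insert kv.1 (relation ++ "-" ++ kv.2 ++ "-2")) (PySem.Dict.empty : PySem.Dict String String)
     let table := relation_label_1.foldl
        (fun t kv => t.insert kv.1 (relation ++ "-" ++ kv.2 ++ "-1")) table0
     table.getD w "O") =
    (if w ∈ (PySem.Dict.mk relation_label_1).keys then
      relation ++ "-" ++ (PySem.Dict.mk relation_label_1).getD w "" ++ "-1"
    else if w ∈ (PySem.Dict.mk relation_label_2).keys then
      relation ++ "-" ++ (PySem.Dict.mk relation_label_2).getD w "" ++ "-2"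
    else "O") := by
  simp only
  rw [PySem.Dict.getD_eq_get?_getD,
      get?_foldl_insert_label relation_label_1 (fun v => relation ++ "-" ++ v ++ "-1") _ h1 w,
      get?_foldl_insert_label relation_label_2 (fun v => relation ++ "-" ++ v ++ "-2") _ h2 w]
  cases hget1 : (PySem.Dict.mk relation_label_1).get? w with
  | some v =>
    have hm1 : w ∈ (PySem.Dict.mk relation_label_1).keys := by
      by_contra hc
      rw [(PySem.Dict.get?_eq_none_iff_not_mem_keys _ _).mpr hc] at hget1
      simp at hget1
    rw [if_pos hm1, PySem.Dict.getD_eq_get?_getD, hget1]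
    rfl
  | none =>
    have hm1 : w ∉ (PySem.Dict.mk relation_label_1).keys :=
      (PySem.Dict.get?_eq_none_iff_not_mem_keys _ _).mp hget1
    rw [if_neg hm1]
    cases hget2 : (PySem.Dict.mk relation_label_2).get? w with
    | some v =>
      have hm2 : w ∈ (PySem.Dict.mk relation_label_2).keys := by
        by_contra hc
        rw [(PySem.Dict.get?_eq_none_iff_not_mem_keys _ _).mpr hc] at hget2
        simp at hget2
      rw [if_pos hm2, PySem.Dict.getD_eq_get?_getD, hget2]
      rfl
    | none =>
      have hm2 : w ∉ (PySem.Dict.mk relation_label_2).keys :=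
        (PySem.Dict.get?_eq_none_iff_not_mem_keys _ _).mp hget2
      rw [if_neg hm2, PySem.Dict.get?_empty]
      rfl

-- A's append-accumulating fold is the map of its per-word value.
theorem foldl_append_eq_map {α β : Type} (l : List α) (g : α → β) (a : List β) :
    l.foldl (fun acc i => acc ++ [g i]) a = a ++ l.map g := by
  induction l generalizing a with
  | nil => simp
  | cons x xs ih => simp [ih]

-- ===== VERDICT (by name: the statement is the Claim_ definition above) =====
theorem sentence_label_construction_spec : Claim_equal_sentence_label_construction := by
  intro sentence rl1 rl2 relation _hdom hpre
  unfold Spec_sentence_label_construction sentence_label_construction sentence_label_construction_alt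
  simp only
  have hfold := foldl_append_eq_map ((PySem.Str.split? sentence " ").getD [])
    (fun i =>
      if i ∈ (PySem.Dict.mk rl1).keys then
        relation ++ "-" ++ (PySem.Dict.mk rl1).getD i "" ++ "-1"
      else if i ∈ (PySem.Dict.mk rl2).keys then
        relation ++ "-" ++ (PySem.Dict.mk rl2).getD i "" ++ "-2"
      else "O") []
  rw [show (fun (output_list : List String) i =>
        if i ∈ (PySem.Dict.mk rl1).keys then
          output_list ++ [relation ++ "-" ++ (PySem.Dict.mk rl1).getD i "" ++ "-1"]
        else if i ∈ (PySem.Dict.mk rl2).keys then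
          output_list ++ [relation ++ "-" ++ (PySem.Dict.mk rl2).getD i "" ++ "-2"]
        else output_list ++ ["O"]) =
      (fun (acc : List String) i => acc ++
        [if i ∈ (PySem.Dict.mk rl1).keys then
          relation ++ "-" ++ (PySem.Dict.mk rl1).getD i "" ++ "-1"
        else if i ∈ (PySem.Dict.mk rl2).keys then
          relation ++ "-" ++ (PySem.Dict.mk rl2).getD i "" ++ "-2"
        else "O"]) from by funext acc i; split_ifs <;> rfl]
  rw [hfold]
  simp only [List.nil_append]
  apply List.map_congr_left
  intro w _
  exact (word_label_eq rl1 rl2 relation hpre.1 hpre.2 w).symm
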